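-- pv_equiv track=rewrite | github.com/pypi-data/pypi-mirror-89 | packages/comaze-gym/comaze_gym-0.0.1-py3-none-any.whl/comaze_gym/env/comaze_gym_env.py | _regularise_communication_channel
-- ===== SOURCE A (Python) =====
-- def _regularise_communication_channel(communication_channel_output):
--     # Regularise the use of EoS symbol:
--     make_eos = False
--     for idx, o in enumerate(communication_channel_output):
--         if make_eos:
--             communication_channel_output[idx] = 0
--             continue
--         if o==0:
--             make_eos = True
--
--     return communication_channel_output
-- ===== SOURCE B (Python) =====
-- def _regularise_communication_channel(communication_channel_output):
--     # Locate the first EoS zero, then fill everything after it with zeros.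
--     k = next((i for i, o in enumerate(communication_channel_output) if o == 0), None)
--     if k is not None:
--         communication_channel_output[k + 1:] = [0] * (len(communication_channel_output) - k - 1)
--     return communication_channel_output
-- ===== Notes on version B (the rewrite author's own statement) =====
-- stated objective: simpler
-- what changed: Replaces the flag-driven single scan with a locate phase (index of the first zero) plus a bulk slice-assignment fill of zeros after it.
import Mathlib
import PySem

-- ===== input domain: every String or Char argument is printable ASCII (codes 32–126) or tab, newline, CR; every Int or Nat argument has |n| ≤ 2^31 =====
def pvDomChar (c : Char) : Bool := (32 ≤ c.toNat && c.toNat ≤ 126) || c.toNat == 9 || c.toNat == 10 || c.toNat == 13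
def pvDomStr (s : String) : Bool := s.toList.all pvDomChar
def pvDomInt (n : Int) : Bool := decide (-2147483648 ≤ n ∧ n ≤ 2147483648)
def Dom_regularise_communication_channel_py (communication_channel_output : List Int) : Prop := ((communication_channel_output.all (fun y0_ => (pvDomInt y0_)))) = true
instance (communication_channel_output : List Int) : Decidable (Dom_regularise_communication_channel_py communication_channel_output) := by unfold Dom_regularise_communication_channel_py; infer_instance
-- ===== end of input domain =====

-- B splits A's flag-driven scan into a locate phase and a bulk fill of the suffix (simpler decomposition, same cost).
-- Both Pythons mutate the input list in place and return it; the equivalence proved here is about the return value.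

-- ===== PORT A =====
-- the loop with the make_eos flag: while the flag is set every element becomes 0,
-- otherwise the element is kept and the flag is set when it equals 0
def pvGoA (make_eos : Bool) : List Int → List Int
  | [] => []
  | o :: t => if make_eos then 0 :: pvGoA true t
              else o :: pvGoA (o == 0) t

def regularise_communication_channel_py (communication_channel_output : List Int) : List Int :=
  pvGoA false communication_channel_output

-- ===== PORT B =====
def regularise_communication_channel_py_alt (communication_channel_output : List Int) : List Int :=
  match communication_channel_output.findIdx? (fun o => o == 0) with
  | none => communication_channel_output
  | some k => communication_channel_output.take (k + 1)
              ++ List.replicate (communication_channel_output.length - k - 1) 0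

-- ===== PRECONDITION & SPEC =====
def Spec_regularise_communication_channel_py (communication_channel_output : List Int) (out : List Int) : Prop := out = regularise_communication_channel_py_alt communication_channel_output
instance (communication_channel_output : List Int) (out : List Int) : Decidable (Spec_regularise_communication_channel_py communication_channel_output out) := by unfold Spec_regularise_communication_channel_py; infer_instance

-- ===== CLAIM (what is proved, stated in full; the proofs are below) =====
def Claim_equal_regularise_communication_channel_py : Prop := ∀ (communication_channel_output : List Int), Dom_regularise_communication_channel_py communication_channel_output → Spec_regularise_communication_channel_py communication_channel_output (regularise_communication_channel_py communication_channel_output)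

-- ===== LEMMAS AND PROOFS =====
theorem pvGoA_true (t : List Int) : pvGoA true t = List.replicate t.length 0 := by
  induction t with
  | nil => rfl
  | cons o t ih => simp [pvGoA, ih, List.replicate]

theorem pvGoA_false_eq_alt (xs : List Int) :
    pvGoA false xs = regularise_communication_channel_py_alt xs := by
  induction xs with
  | nil => rfl
  | cons o t ih =>
    by_cases ho : o = 0
    · subst ho
      simp [pvGoA, regularise_communication_channel_py_alt, List.findIdx?_cons, pvGoA_true]
    · have ho' : (o == 0) = false := by simp [ho]
      simp only [pvGoA, if_neg (by simp : ¬ (false = true)), ho']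
      unfold regularise_communication_channel_py_alt
      rw [List.findIdx?_cons]
      simp only [ho']
      cases h : t.findIdx? (fun o => o == 0) with
      | none =>
        rw [regularise_communication_channel_py_alt, h] at ih
        simp [Option.map_none, ih]
      | some k =>
        rw [regularise_communication_channel_py_alt, h] at ih
        simp only [Option.map_some, ih]
        simp [List.take_succ_cons, List.length_cons]

theorem regularise_communication_channel_py_spec : Claim_equal_regularise_communication_channel_py := by
  intro xs _
  show regularise_communication_channel_py xs = _
  rw [regularise_communication_channel_py, pvGoA_false_eq_alt]
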